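-- pv_equiv track=rewrite | github.com/ariannamethod/microkarpathy | microkarpathy.py | phonetic
-- ===== SOURCE A (Python) =====
-- def phonetic(word):
--     # strip trailing silent 'e' (spine→spin, baseline→baselin, slate→slat)
--     w = word
--     if len(w) > 3 and w[-1] == 'e' and w[-2] not in 'aeiou':
--         w = w[:-1]
--     vowels = set('aeiou')
--     last_v = -1
--     for i, c in enumerate(w):
--         if c in vowels: last_v = i
--     return w[last_v:] if last_v >= 0 else w[-3:]
-- ===== SOURCE B (Python) =====
-- def phonetic(word):
--     # same trailing-silent-'e' strip as A
--     w = word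
--     if len(w) > 3 and w.endswith('e') and w[-2] not in 'aeiou':
--         w = w[:-1]
--     # last vowel position as the max of per-vowel rfind (instead of A's
--     # index-accumulating character scan); rfind gives -1 when absent
--     last_v = max(w.rfind(v) for v in 'aeiou')
--     return w[last_v:] if last_v >= 0 else w[-3:]
-- ===== Notes on version B (the rewrite author's own statement) =====
-- stated objective: faster
-- what changed: Replaced A's forward per-character Python scan that accumulates the last vowel index with a max over five str.rfind calls (one per vowel), keeping the same trailing-silent-vowel strip and the w[-3:] fallback.
import Mathlib
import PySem

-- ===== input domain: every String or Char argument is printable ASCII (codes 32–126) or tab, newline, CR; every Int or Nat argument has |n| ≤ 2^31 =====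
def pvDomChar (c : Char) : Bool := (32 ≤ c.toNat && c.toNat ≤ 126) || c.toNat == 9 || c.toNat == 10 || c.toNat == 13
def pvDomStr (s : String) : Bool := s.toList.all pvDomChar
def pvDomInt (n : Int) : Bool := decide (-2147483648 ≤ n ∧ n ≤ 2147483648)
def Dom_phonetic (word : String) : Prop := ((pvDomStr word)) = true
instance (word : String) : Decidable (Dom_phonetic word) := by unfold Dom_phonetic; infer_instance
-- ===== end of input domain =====

-- B computes the last-vowel position as the max of five per-vowel rfind calls instead of
-- A's per-character forward scan accumulating the last vowel index (objective: faster; measured faster in a timing run — rfind scans in C).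

-- vowel test, 'c in "aeiou"' (used by both Pythons)
def phoneticVowel (c : Char) : Bool := c == 'a' || c == 'e' || c == 'i' || c == 'o' || c == 'u'

-- ===== PORT A =====
def phonetic (word : String) : String :=
  let w : List Char :=
    if word.toList.length > 3 && (PySem.List.pyGet? word.toList (-1) == some 'e')
        && !(Option.any phoneticVowel (PySem.List.pyGet? word.toList (-2)))
    then PySem.List.slice word.toList none (some (-1)) else word.toList
  let lastV : Int :=
    (PySem.List.enumerate w).foldl (fun acc p => if phoneticVowel p.2 then p.1 else acc) (-1)
  String.ofList (if lastV ≥ 0 then PySem.List.slice w (some lastV) none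
             else PySem.List.slice w (some (-3)) none)

-- ===== PORT B =====
-- w.rfind(c): index of the last occurrence of c in w, -1 if absent (Python str.rfind,
-- exact: first index of c in the reversed list, converted back)
def pvRFind (w : List Char) (c : Char) : Int :=
  match w.reverse.idxOf? c with
  | some j => (w.length : Int) - 1 - (j : Int)
  | none => -1

def phonetic_alt (word : String) : String :=
  -- same trailing-silent-'e' strip as A (w.endswith('e') ≡ w[-1] == 'e' here)
  let w : List Char :=
    if word.toList.length > 3 && PySem.Chars.endswith word.toList ['e']
        && !(Option.any phoneticVowel (PySem.List.pyGet? word.toList (-2)))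
    then PySem.List.slice word.toList none (some (-1)) else word.toList
  -- last_v = max(w.rfind(v) for v in 'aeiou')
  let lastV : Int := (['a', 'e', 'i', 'o', 'u'].map (fun v => pvRFind w v)).foldl max (-1)
  String.ofList (if lastV ≥ 0 then PySem.List.slice w (some lastV) none
             else PySem.List.slice w (some (-3)) none)

-- ===== PRECONDITION & SPEC =====
def Spec_phonetic (word : String) (out : String) : Prop := out = phonetic_alt word
instance (word : String) (out : String) : Decidable (Spec_phonetic word out) := by unfold Spec_phonetic; infer_instance

-- ===== CLAIM (what is proved, stated in full; the proofs are below) =====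
def Claim_equal_phonetic : Prop := ∀ (word : String), Dom_phonetic word → Spec_phonetic word (phonetic word)

-- ===== LEMMAS AND PROOFS =====

-- index of the LAST vowel of w, if any (the shared specification of both computations)
def pvLastVow : List Char → Option Nat
  | [] => none
  | c :: rest =>
    match pvLastVow rest with
    | some k => some (k + 1)
    | none => if phoneticVowel c then some 0 else none

theorem pvLastVow_concat (u : List Char) (c : Char) :
    pvLastVow (u ++ [c]) = if phoneticVowel c then some u.length else pvLastVow u := by
  induction u with
  | nil => cases h : phoneticVowel c <;> simp [pvLastVow, h]
  | cons a u ih =>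
    cases h : phoneticVowel c <;> simp [pvLastVow, ih, h]

-- A's foldl over enumerate computes the last vowel index (or keeps acc)
theorem pvFoldA (w : List Char) : ∀ (s acc : Int),
    (PySem.List.enumerate w s).foldl (fun acc p => if phoneticVowel p.2 then p.1 else acc) acc
    = match pvLastVow w with | some k => s + k | none => acc := by
  induction w with
  | nil => intro s acc; simp [PySem.List.enumerate_nil, pvLastVow]
  | cons c rest ih =>
    intro s acc
    rw [PySem.List.enumerate_cons, List.foldl_cons, ih]
    cases h : pvLastVow rest with
    | some k => simp [pvLastVow, h]; ring
    | none => cases hc : phoneticVowel c <;> simp [pvLastVow, h, hc]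

-- rfind on a snoc: the appended character wins, otherwise the old value
theorem pvRFind_concat (u : List Char) (c v : Char) :
    pvRFind (u ++ [c]) v = if v == c then (u.length : Int) else pvRFind u v := by
  unfold pvRFind
  rw [List.reverse_append]
  by_cases h : v = c
  · simp [h, List.idxOf?_cons]
  · have hb : (c == v) = false := by simp [Ne.symm h]
    simp only [List.reverse_singleton, List.singleton_append, List.idxOf?_cons, hb,
      Bool.false_eq_true, if_false, beq_iff_eq, h]
    cases hio : u.reverse.idxOf? v with
    | none => simp
    | some j => simp [List.length_append]; ring

theorem pvRFind_lt (u : List Char) (v : Char) :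
    -1 ≤ pvRFind u v ∧ pvRFind u v < (u.length : Int) := by
  cases hio : u.reverse.idxOf? v with
  | none => exact ⟨by simp [pvRFind, hio], by simp [pvRFind, hio]; omega⟩
  | some j =>
    have hj : j < u.length := by
      have := (List.idxOf?_eq_some_iff.mp hio).1; simpa using this
    constructor <;> simp [pvRFind, hio] <;> omega

-- B's max of per-vowel rfinds computes the last vowel index (-1 when none)
theorem pvMaxRFind (w : List Char) :
    (['a', 'e', 'i', 'o', 'u'].map (fun v => pvRFind w v)).foldl max (-1)
    = match pvLastVow w with | some k => (k : Int) | none => -1 := by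
  induction w using List.reverseRecOn with
  | nil => simp [pvRFind, pvLastVow]
  | append_singleton u c ih =>
    rw [pvLastVow_concat]
    simp only [List.map, List.foldl, pvRFind_concat]
    have ha := pvRFind_lt u 'a'
    have he := pvRFind_lt u 'e'
    have hi := pvRFind_lt u 'i'
    have ho := pvRFind_lt u 'o'
    have hu := pvRFind_lt u 'u'
    cases hc : phoneticVowel c with
    | true =>
      have hc' := hc
      simp only [phoneticVowel, Bool.or_eq_true, beq_iff_eq] at hc'
      rcases hc' with ((((rfl | rfl) | rfl) | rfl) | rfl) <;> simp <;> omega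
    | false =>
      have hne : ∀ v : Char, phoneticVowel v = true → (v == c) = false := by
        intro v hv
        by_cases hvc : v = c
        · subst hvc; rw [hv] at hc; cases hc
        · simp [hvc]
      simp only [hne 'a' (by decide), hne 'e' (by decide), hne 'i' (by decide),
        hne 'o' (by decide), hne 'u' (by decide), Bool.false_eq_true, if_false]
      simpa using ih

-- the two strip guards agree: endswith('e') ≡ w[-1] == 'e'
theorem pvGuard_eq (l : List Char) :
    PySem.Chars.endswith l ['e'] = (PySem.List.pyGet? l (-1) == some 'e') := by
  induction l using List.reverseRecOn with
  | nil => decide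
  | append_singleton u c ih =>
    rw [PySem.List.pyGet?_neg_one_append_singleton]
    rw [Bool.eq_iff_iff, PySem.Chars.endswith_iff, beq_iff_eq, Option.some_inj]
    rw [List.suffix_iff_eq_drop]
    constructor
    · intro h
      have := congrArg List.getLast? h
      simpa using this.symm
    · rintro rfl
      simp

-- ===== VERDICT (by name: the statement is the Claim_ definition above) =====
theorem phonetic_spec : Claim_equal_phonetic := by
  intro word _
  unfold Spec_phonetic phonetic phonetic_alt
  rw [pvGuard_eq]
  simp only []
  generalize (if word.toList.length > 3 && (PySem.List.pyGet? word.toList (-1) == some 'e')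
        && !(Option.any phoneticVowel (PySem.List.pyGet? word.toList (-2)))
    then PySem.List.slice word.toList none (some (-1)) else word.toList) = w
  rw [pvMaxRFind w, pvFoldA w 0 (-1)]
  cases h : pvLastVow w with
  | none => norm_num
  | some k => simp
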